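-- pv_equiv track=rewrite | github.com/raffaelecheula/ase_cantera_microkinetics | examples/Rh100/plot_results.py | cantera_to_labels
-- ===== SOURCE A (Python) =====
-- def cantera_to_labels(
--     label: str,
-- ) -> str:
--     """
--     Convert Cantera key to label for plotting.
--     """
--     replacements = {
--         "O2": "O$_2$",
--         "H2": "H$_2$",
--         "(Rh)": "*",
--         "(Rh,Rh)": "**",
--         "<=>": "→",
--         " ": "",
--     }
--     for key, value in replacements.items():
--         label = label.replace(key, value)
--     return label
-- ===== SOURCE B (Python) =====
-- def cantera_to_labels(
--     label: str,
-- ) -> str: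
--     """
--     Convert Cantera key to label for plotting: one left-to-right scan,
--     trying the replacement keys longest-first at each position.
--     """
--     table = sorted(
--         [("O2", "O$_2$"), ("H2", "H$_2$"), ("(Rh)", "*"),
--          ("(Rh,Rh)", "**"), ("<=>", "→"), (" ", "")],
--         key=lambda kv: len(kv[0]), reverse=True)
--     out = []
--     i = 0
--     n = len(label)
--     while i < n:
--         for key, val in table:
--             if label.startswith(key, i):
--                 out.append(val)
--                 i += len(key)
--                 break
--         else:
--             out.append(label[i])
--             i += 1
--     return "".join(out)
-- ===== Notes on version B (the rewrite author's own statement) =====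
-- stated objective: alternative
-- what changed: A makes six sequential full-string str.replace passes (one per dict entry); B makes one left-to-right scan that at each position tries the replacement keys longest-first and emits the mapped value or the character.
import Mathlib
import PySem

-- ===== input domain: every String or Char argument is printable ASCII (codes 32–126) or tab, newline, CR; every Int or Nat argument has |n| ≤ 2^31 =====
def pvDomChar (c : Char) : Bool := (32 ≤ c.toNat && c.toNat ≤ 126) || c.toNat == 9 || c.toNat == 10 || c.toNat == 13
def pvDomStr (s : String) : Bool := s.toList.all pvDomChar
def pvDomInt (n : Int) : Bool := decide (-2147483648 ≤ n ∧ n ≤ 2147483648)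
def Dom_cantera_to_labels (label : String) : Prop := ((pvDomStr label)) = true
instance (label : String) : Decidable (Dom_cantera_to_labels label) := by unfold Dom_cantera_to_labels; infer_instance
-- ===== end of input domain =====

-- B replaces A's six sequential full-string `replace` passes by one left-to-right
-- table-driven scan (longest key first at each position); same return value (alternative).

-- ===== PORT A =====
-- A: label.replace(key, value) applied for the six dict entries in insertion order.
def cantera_to_labels (label : String) : String :=
  PySem.Str.replace
    (PySem.Str.replace
      (PySem.Str.replace
        (PySem.Str.replace
          (PySem.Str.replace
            (PySem.Str.replace label "O2" "O$_2$")
            "H2" "H$_2$")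
          "(Rh)" "*")
        "(Rh,Rh)" "**")
      "<=>" "→")
    " " ""

-- ===== PORT B =====
-- B: one pass; at each position try the keys longest-first (the order of
-- `sorted(replacements, key=len, reverse=True)`), emit the mapped value or the char.
def canteraScan : List Char → List Char
  | [] => []
  | c :: t =>
    if ['(', 'R', 'h', ',', 'R', 'h', ')'].isPrefixOf (c :: t) then
      '*' :: '*' :: canteraScan (t.drop 6)
    else if ['(', 'R', 'h', ')'].isPrefixOf (c :: t) then
      '*' :: canteraScan (t.drop 3)
    else if ['<', '=', '>'].isPrefixOf (c :: t) then
      '→' :: canteraScan (t.drop 2)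
    else if ['O', '2'].isPrefixOf (c :: t) then
      'O' :: '$' :: '_' :: '2' :: '$' :: canteraScan (t.drop 1)
    else if ['H', '2'].isPrefixOf (c :: t) then
      'H' :: '$' :: '_' :: '2' :: '$' :: canteraScan (t.drop 1)
    else if c = ' ' then
      canteraScan t
    else
      c :: canteraScan t
  termination_by l => l.length
  decreasing_by all_goals (simp [List.length_drop]; try omega)

def cantera_to_labels_alt (label : String) : String :=
  String.ofList (canteraScan label.toList)

-- ===== PRECONDITION & SPEC =====
def Spec_cantera_to_labels (label : String) (out : String) : Prop := out = cantera_to_labels_alt label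
instance (label : String) (out : String) : Decidable (Spec_cantera_to_labels label out) := by unfold Spec_cantera_to_labels; infer_instance

-- ===== CLAIM (what is proved, stated in full; the proofs are below) =====
def Claim_equal_cantera_to_labels : Prop := ∀ (label : String), Dom_cantera_to_labels label → Spec_cantera_to_labels label (cantera_to_labels label)

-- ===== LEMMAS AND PROOFS =====

-- Simple recursive characterisation of one `str.replace` pass (key kh :: kt, value v).
def repS (kh : Char) (kt v : List Char) : List Char → List Char
  | [] => []
  | c :: t =>
    if (kh :: kt).isPrefixOf (c :: t) then v ++ repS kh kt v (t.drop kt.length)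
    else c :: repS kh kt v t
  termination_by l => l.length
  decreasing_by all_goals (simp [List.length_drop]; try omega)

theorem repS_go (kh : Char) (kt v : List Char) :
    ∀ (fuel : Nat) (s acc : List Char), s.length ≤ fuel →
      PySem.Chars.replace.go (kh :: kt) v fuel s acc = acc.reverse ++ repS kh kt v s := by
  intro fuel
  induction fuel with
  | zero =>
    intro s acc hs
    have : s = [] := by cases s <;> simp_all
    subst this
    rw [PySem.Chars.replace.go.eq_def]
    simp [repS]
  | succ n ih =>
    intro s acc hs
    cases s with
    | nil => rw [PySem.Chars.replace.go.eq_def]; simp [repS]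
    | cons c t =>
      rw [PySem.Chars.replace.go.eq_def]
      simp only []
      by_cases h : (kh :: kt).isPrefixOf (c :: t) = true
      · simp only [h, if_true]
        have hlen : (List.drop (kh :: kt).length (c :: t)).length ≤ n := by
          simp only [List.length_drop, List.length_cons] at *
          omega
        rw [ih _ _ hlen]
        simp [repS, h]
      · rw [if_neg h]
        have hlen : t.length ≤ n := by simp at hs; omega
        rw [ih _ _ hlen]
        simp [repS, h]

theorem replace_eq (kh : Char) (kt v s : List Char) :
    PySem.Chars.replace s (kh :: kt) v = repS kh kt v s := by
  unfold PySem.Chars.replace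
  simp [repS_go kh kt v s.length s [] (le_refl _)]

-- A char different from the key's head passes through unchanged.
theorem pass_cons (kh : Char) (kt v : List Char) (c : Char) (x : List Char) (h : c ≠ kh) :
    repS kh kt v (c :: x) = c :: repS kh kt v x := by
  rw [repS]
  simp [List.isPrefixOf, Ne.symm h]

-- A block containing no occurrence of the key's head passes through unchanged.
theorem pass_pre (kh : Char) (kt v : List Char) (p : List Char) (h : kh ∉ p) :
    ∀ y, repS kh kt v (p ++ y) = p ++ repS kh kt v y := by
  induction p with
  | nil => intro y; simp
  | cons a p ih =>
    intro y
    have ha : a ≠ kh := fun hh => h (by simp [hh])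
    have hp : kh ∉ p := fun hh => h (by simp [hh])
    simp [pass_cons kh kt v a _ ha, ih hp y]

-- The key itself at the front is replaced by the value.
theorem key_eval (kh : Char) (kt v : List Char) (y : List Char) :
    repS kh kt v ((kh :: kt) ++ y) = v ++ repS kh kt v y := by
  rw [show (kh :: kt) ++ y = kh :: (kt ++ y) from rfl, repS]
  have hpre : (kh :: kt).isPrefixOf (kh :: (kt ++ y)) = true := by
    exact List.isPrefixOf_iff_prefix.mpr ⟨y, rfl⟩
  simp only [hpre, if_true]
  congr 1
  congr 1
  exact List.drop_left (l₁ := kt) (l₂ := y)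

-- If the value is nonempty and the output begins with a char that is neither the
-- key's head nor the value's head, the input began with that char (and the scan passed it).
theorem inv_cons (kh : Char) (kt v : List Char) (c : Char) (x : List Char)
    (hv0 : v ≠ []) (hv : v.head? ≠ some c) :
    (repS kh kt v x).head? = some c → ∃ x', x = c :: x' := by
  cases x with
  | nil => simp [repS]
  | cons a t =>
    rw [repS]
    by_cases h : (kh :: kt).isPrefixOf (a :: t) = true
    · intro hhd
      exfalso
      rw [if_pos h] at hhd
      rw [List.head?_append] at hhd
      cases v with
      | nil => exact hv0 rfl
      | cons w v' => simp at hhd; exact hv (by simp [hhd])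
    · rw [if_neg h]
      intro hhd
      simp only [List.head?_cons, Option.some.injEq] at hhd
      exact ⟨t, by rw [hhd]⟩

-- A prefix of the output made of chars that are neither the key's head nor the
-- value's head was already a prefix of the input.
theorem pre_trans (kh : Char) (kt v : List Char) (hv0 : v ≠ [])
    (p : List Char) (hp : ∀ a ∈ p, a ≠ kh ∧ v.head? ≠ some a) :
    ∀ x, p.isPrefixOf (repS kh kt v x) = true → p.isPrefixOf x = true := by
  induction p with
  | nil => intro x _; simp [List.isPrefixOf]
  | cons a p ih =>
    intro x hpre
    have ha := hp a (by simp)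
    have hhd : (repS kh kt v x).head? = some a := by
      rcases List.isPrefixOf_iff_prefix.mp hpre with ⟨r, hr⟩
      rw [← hr]; cases p <;> simp
    obtain ⟨x', rfl⟩ := inv_cons kh kt v a x hv0 ha.2 hhd
    rw [pass_cons kh kt v a x' ha.1] at hpre
    have h1 : p.isPrefixOf (repS kh kt v x') = true := by
      simpa [List.isPrefixOf] using hpre
    have h2 := ih (fun b hb => hp b (by simp [hb])) x' h1
    simpa [List.isPrefixOf] using h2

-- The six sequential replace passes, fused: value lists of the six entries.
def VO2 : List Char := ['O','$','_','2','$']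
def VH2 : List Char := ['H','$','_','2','$']

-- One (Rh,Rh) block at the front passes through the "(Rh)" pass untouched.
theorem f3_skip (y : List Char) :
    repS '(' ['R','h',')'] ['*'] (['(','R','h',',','R','h',')'] ++ y)
      = ['(','R','h',',','R','h',')'] ++ repS '(' ['R','h',')'] ['*'] y := by
  rw [show (['(','R','h',',','R','h',')'] : List Char) ++ y
        = '(' :: (['R','h',',','R','h',')'] ++ y) from rfl]
  rw [repS, if_neg (by simp [List.isPrefixOf])]
  rw [pass_pre '(' ['R','h',')'] ['*'] ['R','h',',','R','h',')'] (by decide)]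
  rfl

-- A's six passes in sequence compute exactly B's one fused scan.
set_option maxRecDepth 8192 in
theorem chain_eq_scan : ∀ (l : List Char),
    repS ' ' [] [] (repS '<' ['=','>'] ['→'] (repS '(' ['R','h',',','R','h',')'] ['*','*']
      (repS '(' ['R','h',')'] ['*'] (repS 'H' ['2'] VH2 (repS 'O' ['2'] VO2 l)))))
      = canteraScan l := by
  intro l
  fun_induction canteraScan l with
  | case1 => simp [repS]
  | case2 c t h ih =>
    obtain ⟨r, hr⟩ := List.isPrefixOf_iff_prefix.mp h
    simp only [List.cons_append, List.nil_append, List.cons.injEq] at hr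
    obtain ⟨rfl, rfl⟩ := hr
    rw [show ('(' :: 'R' :: 'h' :: ',' :: 'R' :: 'h' :: ')' :: r : List Char)
          = ['(','R','h',',','R','h',')'] ++ r from rfl]
    rw [pass_pre 'O' ['2'] VO2 ['(','R','h',',','R','h',')'] (by decide)]
    rw [pass_pre 'H' ['2'] VH2 ['(','R','h',',','R','h',')'] (by decide)]
    rw [f3_skip]
    rw [key_eval '(' ['R','h',',','R','h',')'] ['*','*']]
    rw [pass_pre '<' ['=','>'] ['→'] ['*','*'] (by decide)]
    rw [pass_pre ' ' [] [] ['*','*'] (by decide)]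
    rw [show List.drop 6 ('R' :: 'h' :: ',' :: 'R' :: 'h' :: ')' :: r) = r from rfl] at ih
    rw [ih]
    rfl
  | case3 c t h1 h ih =>
    obtain ⟨r, hr⟩ := List.isPrefixOf_iff_prefix.mp h
    simp only [List.cons_append, List.nil_append, List.cons.injEq] at hr
    obtain ⟨rfl, rfl⟩ := hr
    rw [show ('(' :: 'R' :: 'h' :: ')' :: r : List Char) = ['(','R','h',')'] ++ r from rfl]
    rw [pass_pre 'O' ['2'] VO2 ['(','R','h',')'] (by decide)]
    rw [pass_pre 'H' ['2'] VH2 ['(','R','h',')'] (by decide)]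
    rw [key_eval '(' ['R','h',')'] ['*']]
    rw [pass_pre '(' ['R','h',',','R','h',')'] ['*','*'] ['*'] (by decide)]
    rw [pass_pre '<' ['=','>'] ['→'] ['*'] (by decide)]
    rw [pass_pre ' ' [] [] ['*'] (by decide)]
    rw [show List.drop 3 ('R' :: 'h' :: ')' :: r) = r from rfl] at ih
    rw [ih]
    rfl
  | case4 c t h1 h2 h ih =>
    obtain ⟨r, hr⟩ := List.isPrefixOf_iff_prefix.mp h
    simp only [List.cons_append, List.nil_append, List.cons.injEq] at hr
    obtain ⟨rfl, rfl⟩ := hr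
    rw [show ('<' :: '=' :: '>' :: r : List Char) = ['<','=','>'] ++ r from rfl]
    rw [pass_pre 'O' ['2'] VO2 ['<','=','>'] (by decide)]
    rw [pass_pre 'H' ['2'] VH2 ['<','=','>'] (by decide)]
    rw [pass_pre '(' ['R','h',')'] ['*'] ['<','=','>'] (by decide)]
    rw [pass_pre '(' ['R','h',',','R','h',')'] ['*','*'] ['<','=','>'] (by decide)]
    rw [key_eval '<' ['=','>'] ['→']]
    rw [pass_pre ' ' [] [] ['→'] (by decide)]
    rw [show List.drop 2 ('=' :: '>' :: r) = r from rfl] at ih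
    rw [ih]
    rfl
  | case5 c t h1 h2 h3 h ih =>
    obtain ⟨r, hr⟩ := List.isPrefixOf_iff_prefix.mp h
    simp only [List.cons_append, List.nil_append, List.cons.injEq] at hr
    obtain ⟨rfl, rfl⟩ := hr
    rw [show ('O' :: '2' :: r : List Char) = ['O','2'] ++ r from rfl]
    rw [key_eval 'O' ['2'] VO2]
    rw [show (VO2 ++ repS 'O' ['2'] VO2 r : List Char)
          = ['O','$','_','2','$'] ++ repS 'O' ['2'] VO2 r from rfl]
    rw [pass_pre 'H' ['2'] VH2 ['O','$','_','2','$'] (by decide)]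
    rw [pass_pre '(' ['R','h',')'] ['*'] ['O','$','_','2','$'] (by decide)]
    rw [pass_pre '(' ['R','h',',','R','h',')'] ['*','*'] ['O','$','_','2','$'] (by decide)]
    rw [pass_pre '<' ['=','>'] ['→'] ['O','$','_','2','$'] (by decide)]
    rw [pass_pre ' ' [] [] ['O','$','_','2','$'] (by decide)]
    rw [show List.drop 1 ('2' :: r) = r from rfl] at ih
    rw [ih]
    rfl
  | case6 c t h1 h2 h3 h4 h ih =>
    obtain ⟨r, hr⟩ := List.isPrefixOf_iff_prefix.mp h
    simp only [List.cons_append, List.nil_append, List.cons.injEq] at hr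
    obtain ⟨rfl, rfl⟩ := hr
    rw [show ('H' :: '2' :: r : List Char) = ['H','2'] ++ r from rfl]
    rw [pass_pre 'O' ['2'] VO2 ['H','2'] (by decide)]
    rw [key_eval 'H' ['2'] VH2]
    rw [show (VH2 ++ repS 'H' ['2'] VH2 (repS 'O' ['2'] VO2 r) : List Char)
          = ['H','$','_','2','$'] ++ repS 'H' ['2'] VH2 (repS 'O' ['2'] VO2 r) from rfl]
    rw [pass_pre '(' ['R','h',')'] ['*'] ['H','$','_','2','$'] (by decide)]
    rw [pass_pre '(' ['R','h',',','R','h',')'] ['*','*'] ['H','$','_','2','$'] (by decide)]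
    rw [pass_pre '<' ['=','>'] ['→'] ['H','$','_','2','$'] (by decide)]
    rw [pass_pre ' ' [] [] ['H','$','_','2','$'] (by decide)]
    rw [show List.drop 1 ('2' :: r) = r from rfl] at ih
    rw [ih]
    rfl
  | case7 t h1 h2 h3 h4 h5 ih =>
    rw [show (' ' :: t : List Char) = [' '] ++ t from rfl]
    rw [pass_pre 'O' ['2'] VO2 [' '] (by decide)]
    rw [pass_pre 'H' ['2'] VH2 [' '] (by decide)]
    rw [pass_pre '(' ['R','h',')'] ['*'] [' '] (by decide)]
    rw [pass_pre '(' ['R','h',',','R','h',')'] ['*','*'] [' '] (by decide)]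
    rw [pass_pre '<' ['=','>'] ['→'] [' '] (by decide)]
    rw [key_eval ' ' [] []]
    rw [ih]
    rfl
  | case8 c t h1 h2 h3 h4 h5 h6 ih =>
    have e1 : repS 'O' ['2'] VO2 (c :: t) = c :: repS 'O' ['2'] VO2 t := by
      rw [repS, if_neg h4]
    have hH2 : ¬ (['H','2'].isPrefixOf (c :: repS 'O' ['2'] VO2 t) = true) := by
      intro hp
      obtain ⟨rfl, hx⟩ := by simpa [List.isPrefixOf] using hp
      have hx' := List.isPrefixOf_iff_prefix.mpr hx
      have h2t := pre_trans 'O' ['2'] VO2 (by decide) ['2'] (by simp [VO2]) t hx'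
      exact h5 (by simp [List.isPrefixOf, List.isPrefixOf_iff_prefix.mp h2t])
    have e2 : repS 'H' ['2'] VH2 (c :: repS 'O' ['2'] VO2 t)
        = c :: repS 'H' ['2'] VH2 (repS 'O' ['2'] VO2 t) := by
      rw [repS, if_neg hH2]
    have hR4 : ¬ (['(','R','h',')'].isPrefixOf
        (c :: repS 'H' ['2'] VH2 (repS 'O' ['2'] VO2 t)) = true) := by
      intro hp
      obtain ⟨rfl, hx⟩ := by simpa [List.isPrefixOf] using hp
      have hx' := List.isPrefixOf_iff_prefix.mpr hx
      have hs := pre_trans 'H' ['2'] VH2 (by decide) ['R','h',')'] (by simp [VH2]) _ hx'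
      have ht := pre_trans 'O' ['2'] VO2 (by decide) ['R','h',')'] (by simp [VO2]) t hs
      exact h2 (by simp [List.isPrefixOf, List.isPrefixOf_iff_prefix.mp ht])
    have e3 : repS '(' ['R','h',')'] ['*'] (c :: repS 'H' ['2'] VH2 (repS 'O' ['2'] VO2 t))
        = c :: repS '(' ['R','h',')'] ['*'] (repS 'H' ['2'] VH2 (repS 'O' ['2'] VO2 t)) := by
      rw [repS, if_neg hR4]
    have hR7 : ¬ (['(','R','h',',','R','h',')'].isPrefixOf
        (c :: repS '(' ['R','h',')'] ['*'] (repS 'H' ['2'] VH2 (repS 'O' ['2'] VO2 t))) = true) := by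
      intro hp
      obtain ⟨rfl, hx⟩ := by simpa [List.isPrefixOf] using hp
      have hx' := List.isPrefixOf_iff_prefix.mpr hx
      have hs3 := pre_trans '(' ['R','h',')'] ['*'] (by decide) ['R','h',',','R','h',')'] (by simp) _ hx'
      have hs2 := pre_trans 'H' ['2'] VH2 (by decide) ['R','h',',','R','h',')'] (by simp [VH2]) _ hs3
      have ht := pre_trans 'O' ['2'] VO2 (by decide) ['R','h',',','R','h',')'] (by simp [VO2]) t hs2
      exact h1 (by simp [List.isPrefixOf, List.isPrefixOf_iff_prefix.mp ht])
    have e4 : repS '(' ['R','h',',','R','h',')'] ['*','*']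
          (c :: repS '(' ['R','h',')'] ['*'] (repS 'H' ['2'] VH2 (repS 'O' ['2'] VO2 t)))
        = c :: repS '(' ['R','h',',','R','h',')'] ['*','*']
          (repS '(' ['R','h',')'] ['*'] (repS 'H' ['2'] VH2 (repS 'O' ['2'] VO2 t))) := by
      rw [repS, if_neg hR7]
    have hLT : ¬ (['<','=','>'].isPrefixOf
        (c :: repS '(' ['R','h',',','R','h',')'] ['*','*']
          (repS '(' ['R','h',')'] ['*'] (repS 'H' ['2'] VH2 (repS 'O' ['2'] VO2 t)))) = true) := by
      intro hp
      obtain ⟨rfl, hx⟩ := by simpa [List.isPrefixOf] using hp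
      have hx' := List.isPrefixOf_iff_prefix.mpr hx
      have hs4 := pre_trans '(' ['R','h',',','R','h',')'] ['*','*'] (by decide) ['=','>'] (by simp) _ hx'
      have hs3 := pre_trans '(' ['R','h',')'] ['*'] (by decide) ['=','>'] (by simp) _ hs4
      have hs2 := pre_trans 'H' ['2'] VH2 (by decide) ['=','>'] (by simp [VH2]) _ hs3
      have ht := pre_trans 'O' ['2'] VO2 (by decide) ['=','>'] (by simp [VO2]) t hs2
      exact h3 (by simp [List.isPrefixOf, List.isPrefixOf_iff_prefix.mp ht])
    have e5 : repS '<' ['=','>'] ['→']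
          (c :: repS '(' ['R','h',',','R','h',')'] ['*','*']
            (repS '(' ['R','h',')'] ['*'] (repS 'H' ['2'] VH2 (repS 'O' ['2'] VO2 t))))
        = c :: repS '<' ['=','>'] ['→']
            (repS '(' ['R','h',',','R','h',')'] ['*','*']
              (repS '(' ['R','h',')'] ['*'] (repS 'H' ['2'] VH2 (repS 'O' ['2'] VO2 t)))) := by
      rw [repS, if_neg hLT]
    have e6 : repS ' ' [] []
          (c :: repS '<' ['=','>'] ['→']
            (repS '(' ['R','h',',','R','h',')'] ['*','*']
              (repS '(' ['R','h',')'] ['*'] (repS 'H' ['2'] VH2 (repS 'O' ['2'] VO2 t)))))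
        = c :: repS ' ' [] []
            (repS '<' ['=','>'] ['→']
              (repS '(' ['R','h',',','R','h',')'] ['*','*']
                (repS '(' ['R','h',')'] ['*'] (repS 'H' ['2'] VH2 (repS 'O' ['2'] VO2 t))))) := by
      rw [repS, if_neg (by simp [List.isPrefixOf]; exact fun hh => h6 hh.symm)]
    rw [e1, e2, e3, e4, e5, e6, ih]

-- ===== VERDICT (by name: the statement is the Claim_ definition above) =====
theorem cantera_to_labels_spec : Claim_equal_cantera_to_labels := by
  intro label _
  show cantera_to_labels label = cantera_to_labels_alt label
  unfold cantera_to_labels cantera_to_labels_alt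
  unfold PySem.Str.replace
  simp only [String.toList_ofList]
  rw [show ("O2" : String).toList = ['O','2'] from rfl,
      show ("O$_2$" : String).toList = VO2 from rfl,
      show ("H2" : String).toList = ['H','2'] from rfl,
      show ("H$_2$" : String).toList = VH2 from rfl,
      show ("(Rh)" : String).toList = ['(','R','h',')'] from rfl,
      show ("*" : String).toList = ['*'] from rfl,
      show ("(Rh,Rh)" : String).toList = ['(','R','h',',','R','h',')'] from rfl,
      show ("**" : String).toList = ['*','*'] from rfl,
      show ("<=>" : String).toList = ['<','=','>'] from rfl,
      show ("→" : String).toList = ['→'] from rfl,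
      show (" " : String).toList = [' '] from rfl,
      show ("" : String).toList = ([] : List Char) from rfl]
  rw [replace_eq, replace_eq, replace_eq, replace_eq, replace_eq, replace_eq]
  exact congrArg String.ofList (chain_eq_scan label.toList)
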